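-- pv_equiv track=rewrite | github.com/zyang37/beyond_vector_search | utils/wiki_movie.py | parse_casts
-- ===== SOURCE A (Python) =====
-- def parse_casts(cast_str):
--     casts = []
--     cast_str = cast_str.lower()
--     space_to = ""
--     cast_str = cast_str.replace("\n", "")
--     parse_by_comma = cast_str.split(", ")
--     for i, a in enumerate(parse_by_comma):
--         # parse by 'and'
--         if "and" in a:
--             al = []
--             for v in a.split(" and "):
--                 tmp = v.replace(" ", space_to)
--                 if len(tmp) != 0:
--                     al.append(tmp)
--             a = al[:]
--
--         if type(a) is list:
--             casts.extend(a)
--         else: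
--             if len(a.replace(" ", space_to)) != 0:
--                 casts.append(a.replace(" ", space_to))
--     return casts
-- ===== SOURCE B (Python) =====
-- def parse_casts(cast_str):
--     # Single left-to-right scan: tokenize on ", " and " and " in one pass,
--     # dropping spaces and empty tokens as each token is flushed.
--     s = cast_str.lower().replace("\n", "")
--     out = []
--     cur = []
--     i = 0
--     n = len(s)
--
--     def flush():
--         name = "".join(c for c in cur if c != " ")
--         if name:
--             out.append(name)
--         cur.clear()
--
--     while i < n:
--         if s.startswith(", ", i):
--             flush()
--             i += 2
--         elif s.startswith(" and ", i):
--             flush()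
--             i += 5
--         else:
--             cur.append(s[i])
--             i += 1
--     flush()
--     return out
-- ===== Notes on version B (the rewrite author's own statement) =====
-- stated objective: alternative
-- what changed: A's two-level nested split (split by ', ', then per-piece split by ' and ' guarded by an 'and' substring test, with per-branch space removal) is replaced by a single left-to-right character scan that tokenizes on both delimiters in one pass and drops spaces/empty tokens at each flush.
import Mathlib
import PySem

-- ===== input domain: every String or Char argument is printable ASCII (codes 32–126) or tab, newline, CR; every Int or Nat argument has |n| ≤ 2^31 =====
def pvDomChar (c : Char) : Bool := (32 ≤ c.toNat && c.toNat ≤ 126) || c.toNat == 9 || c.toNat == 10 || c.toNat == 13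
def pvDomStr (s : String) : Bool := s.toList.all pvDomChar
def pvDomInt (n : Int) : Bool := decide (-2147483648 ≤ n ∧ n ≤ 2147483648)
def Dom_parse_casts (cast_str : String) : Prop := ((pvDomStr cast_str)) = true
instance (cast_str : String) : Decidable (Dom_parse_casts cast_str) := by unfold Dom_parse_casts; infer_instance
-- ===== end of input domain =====

-- B replaces A's nested ", "/" and " splits by a single left-to-right scan that tokenizes on
-- both delimiters in one pass (alternative decomposition, same exact return value).

-- ===== PORT A =====
-- literal transliteration of A: lower, drop newlines, split by ", ", then per piece the
-- "and"-guarded split by " and ", removing spaces and skipping empty names (space_to = "").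
def parse_casts (cast_str : String) : List String :=
  let casts : List String := []
  let cs1 := PySem.Chars.lower cast_str.toList
  let cs2 := PySem.Chars.replace cs1 ['\n'] []
  let parse_by_comma := PySem.Chars.splitOn cs2 [',', ' ']
  (PySem.List.enumerate parse_by_comma 0).foldl
    (fun casts ia =>
      let a := ia.2
      if PySem.Chars.isIn ['a', 'n', 'd'] a then
        let al := (PySem.Chars.splitOn a [' ', 'a', 'n', 'd', ' ']).foldl
          (fun al v =>
            let tmp := PySem.Chars.replace v [' '] []
            if tmp.length ≠ 0 then al ++ [String.ofList tmp] else al) []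
        casts ++ al
      else
        if (PySem.Chars.replace a [' '] []).length ≠ 0 then
          casts ++ [String.ofList (PySem.Chars.replace a [' '] [])]
        else casts)
    casts

-- ===== PORT B =====
-- flush(): join the non-space chars of cur, append the name if nonempty
def pvFlush (cur : List Char) : List String :=
  let name := cur.filter (fun c => c ≠ ' ')
  if name.isEmpty then [] else [String.ofList name]

-- the while loop of Source B: startswith ", " / startswith " and " / else copy one char
def pvScan : List Char → List Char → List String
  | [], cur => pvFlush cur
  | c :: rest, cur =>
    if [',', ' '].isPrefixOf (c :: rest) then
      pvFlush cur ++ pvScan ((c :: rest).drop 2) []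
    else if [' ', 'a', 'n', 'd', ' '].isPrefixOf (c :: rest) then
      pvFlush cur ++ pvScan ((c :: rest).drop 5) []
    else
      pvScan rest (cur ++ [c])
termination_by l _ => l.length
decreasing_by all_goals simp

def parse_casts_alt (cast_str : String) : List String :=
  let s := PySem.Str.replace (PySem.Str.lower cast_str) "\n" ""
  pvScan s.toList []

-- ===== PRECONDITION & SPEC =====
def Spec_parse_casts (cast_str : String) (out : List String) : Prop := out = parse_casts_alt cast_str
instance (cast_str : String) (out : List String) : Decidable (Spec_parse_casts cast_str out) := by unfold Spec_parse_casts; infer_instance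

-- ===== CLAIM (what is proved, stated in full; the proofs are below) =====
def Claim_equal_parse_casts : Prop := ∀ (cast_str : String), Dom_parse_casts cast_str → Spec_parse_casts cast_str (parse_casts cast_str)

-- ===== LEMMAS AND PROOFS =====

-- clean recursive splitter, proved equal to the fuel-based PySem.Chars.splitOn (nonempty sep)
def splitCl (s0 : Char) (sep : List Char) : List Char → List (List Char)
  | [] => [[]]
  | c :: rest =>
    if (s0 :: sep).isPrefixOf (c :: rest) then
      [] :: splitCl s0 sep (rest.drop sep.length)
    else
      match splitCl s0 sep rest with
      | [] => [[c]]
      | p :: ps => (c :: p) :: ps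
termination_by l => l.length
decreasing_by all_goals simp

def consHead (x : List Char) : List (List Char) → List (List Char)
  | [] => [x]
  | p :: ps => (x ++ p) :: ps

theorem splitCl_ne_nil (s0 : Char) (sep : List Char) (l : List Char) : splitCl s0 sep l ≠ [] := by
  induction l using splitCl.induct s0 sep with
  | case1 => simp [splitCl]
  | case2 c rest h ih => simp [splitCl, h]
  | case3 c rest h heq => simp [splitCl, h, heq]
  | case4 c rest h p ps heq _ => simp [splitCl, h, heq]

theorem splitCl_cons_of_not_prefix (s0 : Char) (sep : List Char) (c : Char) (rest : List Char)
    (h : ¬ (s0 :: sep).isPrefixOf (c :: rest)) :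
    splitCl s0 sep (c :: rest) = consHead [c] (splitCl s0 sep rest) := by
  rw [splitCl]
  simp only [h, if_false]
  rcases hs : splitCl s0 sep rest with _ | ⟨p, ps⟩
  · exact absurd hs (splitCl_ne_nil s0 sep rest)
  · simp [consHead]

theorem splitOn_go_eq (s0 : Char) (sep : List Char) :
    ∀ fuel l cur acc, l.length < fuel →
      PySem.Chars.splitOn.go (s0 :: sep) fuel l cur acc
        = acc.reverse ++ consHead cur.reverse (splitCl s0 sep l) := by
  intro fuel
  induction fuel with
  | zero => intro l cur acc h; omega
  | succ n ih =>
    intro l cur acc h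
    cases l with
    | nil => simp [PySem.Chars.splitOn.go, splitCl, consHead]
    | cons c rest =>
      rw [PySem.Chars.splitOn.go]
      by_cases hp : (s0 :: sep).isPrefixOf (c :: rest)
      · simp only [hp, if_true, List.length_cons, List.drop_succ_cons]
        rw [ih (rest.drop sep.length) [] (cur.reverse :: acc) (by simp at h ⊢; omega)]
        rw [splitCl]
        simp only [hp, if_true]
        rcases hs : splitCl s0 sep (rest.drop sep.length) with _ | ⟨p, ps⟩
        · exact absurd hs (splitCl_ne_nil _ _ _)
        · simp [consHead, hs]
      · simp only [hp, if_false]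
        rw [ih rest (c :: cur) acc (by simp at h ⊢; omega)]
        rw [splitCl_cons_of_not_prefix _ _ _ _ hp]
        rcases hs : splitCl s0 sep rest with _ | ⟨p, ps⟩
        · exact absurd hs (splitCl_ne_nil _ _ _)
        · simp [consHead, hs]

theorem splitOn_eq (s0 : Char) (sep : List Char) (l : List Char) :
    PySem.Chars.splitOn l (s0 :: sep) = splitCl s0 sep l := by
  rw [PySem.Chars.splitOn, splitOn_go_eq s0 sep _ _ _ _ (by omega)]
  rcases hs : splitCl s0 sep l with _ | ⟨p, ps⟩
  · exact absurd hs (splitCl_ne_nil _ _ _)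
  · simp [consHead]

theorem replace_go_eq (c0 : Char) :
    ∀ fuel (l acc : List Char), l.length ≤ fuel →
      PySem.Chars.replace.go [c0] [] fuel l acc = acc.reverse ++ l.filter (fun c => c ≠ c0) := by
  intro fuel
  induction fuel with
  | zero => intro l acc h
            interval_cases hl : l.length
            rw [List.length_eq_zero_iff] at hl
            subst hl
            simp [PySem.Chars.replace.go]
  | succ n ih =>
    intro l acc h
    cases l with
    | nil => simp [PySem.Chars.replace.go]
    | cons c t =>
      rw [PySem.Chars.replace.go]
      by_cases hc : c = c0
      · subst hc
        simp only [List.isPrefixOf, beq_self_eq_true, Bool.true_and, List.isPrefixOf_nil_left, if_true]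
        rw [ih _ _ (by simp at h ⊢; omega)]
        simp
      · have hp : [c0].isPrefixOf (c :: t) = false := by
          simp [List.isPrefixOf]
          exact fun hh => absurd hh.symm hc
        simp only [hp, if_false, Bool.false_eq_true]
        rw [ih _ _ (by simp at h ⊢; omega)]
        simp [hc]

theorem replace_single (c0 : Char) (l : List Char) :
    PySem.Chars.replace l [c0] [] = l.filter (fun c => c ≠ c0) := by
  rw [PySem.Chars.replace]
  simp only [List.isEmpty_cons, if_false, Bool.false_eq_true]
  exact replace_go_eq c0 l.length l [] le_rfl

theorem consHead_consHead (x y : List Char) (ts : List (List Char)) :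
    consHead x (consHead y ts) = consHead (x ++ y) ts := by
  cases ts <;> simp [consHead]

theorem consHead_append (x : List Char) (qs r : List (List Char)) (h : qs ≠ []) :
    consHead x qs ++ r = consHead x (qs ++ r) := by
  cases qs with
  | nil => exact absurd rfl h
  | cons q qs => simp [consHead]

theorem splitCl_head_prefix (s0 : Char) (sep : List Char) :
    ∀ (l p : List Char) (ps : List (List Char)), splitCl s0 sep l = p :: ps → p <+: l := by
  intro l
  induction l using splitCl.induct s0 sep with
  | case1 => intro p ps h; simp [splitCl] at h; simp [h.1]
  | case2 c rest h ih =>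
    intro p ps hh
    rw [splitCl] at hh; simp only [h, if_true] at hh
    injection hh with hh1 hh2
    exact hh1 ▸ List.nil_prefix
  | case3 c rest h heq =>
    intro p ps hh
    exact absurd heq (splitCl_ne_nil s0 sep rest)
  | case4 c rest h q qs heq ih =>
    intro p ps hh
    rw [splitCl] at hh; simp only [h, if_false] at hh
    rw [heq] at hh
    have := ih q qs heq
    simp at hh
    rw [← hh.1]
    exact List.cons_prefix_cons.mpr ⟨rfl, this⟩

def Ttok (l : List Char) : List (List Char) :=
  (splitCl ',' [' '] l).flatMap (splitCl ' ' ['a', 'n', 'd', ' '])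

theorem Ttok_ne_nil (l : List Char) : Ttok l ≠ [] := by
  unfold Ttok
  rcases hs : splitCl ',' [' '] l with _ | ⟨p, ps⟩
  · exact absurd hs (splitCl_ne_nil _ _ _)
  · simp
    intro hf
    exact absurd hf (splitCl_ne_nil _ _ _)

theorem Ttok_nil : Ttok [] = [[]] := by simp [Ttok, splitCl]

theorem Ttok_comma (rest : List Char) : Ttok (',' :: ' ' :: rest) = [] :: Ttok rest := by
  unfold Ttok
  rw [splitCl]
  simp [List.isPrefixOf, splitCl]

theorem Ttok_and (rest : List Char) :
    Ttok (' ' :: 'a' :: 'n' :: 'd' :: ' ' :: rest) = [] :: Ttok rest := by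
  unfold Ttok
  rw [splitCl_cons_of_not_prefix _ _ _ _ (by simp [List.isPrefixOf]),
      splitCl_cons_of_not_prefix _ _ _ _ (by simp [List.isPrefixOf]),
      splitCl_cons_of_not_prefix _ _ _ _ (by simp [List.isPrefixOf]),
      splitCl_cons_of_not_prefix _ _ _ _ (by simp [List.isPrefixOf]),
      splitCl_cons_of_not_prefix _ _ _ _ (by simp [List.isPrefixOf])]
  rw [consHead_consHead, consHead_consHead, consHead_consHead, consHead_consHead]
  rcases hs : splitCl ',' [' '] rest with _ | ⟨p, ps⟩
  · exact absurd hs (splitCl_ne_nil _ _ _)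
  · simp only [consHead, List.cons_append, List.nil_append, List.flatMap_cons]
    rw [splitCl]
    simp [List.isPrefixOf]

theorem Ttok_other (c : Char) (rest : List Char)
    (h1 : ¬ [',', ' '].isPrefixOf (c :: rest))
    (h2 : ¬ [' ', 'a', 'n', 'd', ' '].isPrefixOf (c :: rest)) :
    Ttok (c :: rest) = consHead [c] (Ttok rest) := by
  rcases hs : splitCl ',' [' '] rest with _ | ⟨p, ps⟩
  · exact absurd hs (splitCl_ne_nil _ _ _)
  · have hp : p <+: rest := splitCl_head_prefix _ _ _ _ _ hs
    have hA : ¬ [' ', 'a', 'n', 'd', ' '].isPrefixOf (c :: p) := by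
      intro hc
      apply h2
      rw [List.isPrefixOf_iff_prefix] at hc ⊢
      rcases List.cons_prefix_cons.mp hc with ⟨hce, htl⟩
      exact List.cons_prefix_cons.mpr ⟨hce, htl.trans hp⟩
    have hr : Ttok rest
        = splitCl ' ' ['a', 'n', 'd', ' '] p ++ ps.flatMap (splitCl ' ' ['a', 'n', 'd', ' ']) := by
      unfold Ttok; rw [hs]; simp [List.flatMap_cons]
    rw [hr, ← consHead_append _ _ _ (splitCl_ne_nil _ _ _)]
    unfold Ttok
    rw [splitCl_cons_of_not_prefix _ _ _ _ h1, hs]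
    simp only [consHead, List.flatMap_cons, List.singleton_append]
    rw [splitCl_cons_of_not_prefix _ _ _ _ hA]
    rcases hq : splitCl ' ' ['a', 'n', 'd', ' '] p with _ | ⟨q, qs⟩
    · exact absurd hq (splitCl_ne_nil _ _ _)
    · simp [consHead]

theorem pvScan_eq (l cur : List Char) :
    ∀ (p : List Char) (ps : List (List Char)), Ttok l = p :: ps →
      pvScan l cur = pvFlush (cur ++ p) ++ ps.flatMap pvFlush := by
  induction l, cur using pvScan.induct with
  | case1 cur =>
    intro p ps ht
    rw [Ttok_nil] at ht
    injection ht with ht1 ht2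
    subst ht1; subst ht2
    simp [pvScan]
  | case2 c rest cur h1 ih =>
    intro p ps ht
    obtain ⟨t, htl⟩ := List.isPrefixOf_iff_prefix.mp h1
    obtain ⟨hc, hrest⟩ : c = ',' ∧ rest = ' ' :: t := by
      cases htl; exact ⟨rfl, rfl⟩
    subst hc; subst hrest
    rw [Ttok_comma] at ht
    injection ht with ht1 ht2
    subst ht1; subst ht2
    rcases hq : Ttok t with _ | ⟨q, qs⟩
    · exact absurd hq (Ttok_ne_nil t)
    · simp only [List.drop_succ_cons, List.drop_zero] at ih
      rw [pvScan]
      simp only [h1, if_true, List.drop_succ_cons, List.drop_zero]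
      rw [ih _ _ hq]
      simp
  | case3 c rest cur h1 h2 ih =>
    intro p ps ht
    obtain ⟨t, htl⟩ := List.isPrefixOf_iff_prefix.mp h2
    obtain ⟨hc, hrest⟩ : c = ' ' ∧ rest = 'a' :: 'n' :: 'd' :: ' ' :: t := by
      cases htl; exact ⟨rfl, rfl⟩
    subst hc; subst hrest
    rw [Ttok_and] at ht
    injection ht with ht1 ht2
    subst ht1; subst ht2
    rcases hq : Ttok t with _ | ⟨q, qs⟩
    · exact absurd hq (Ttok_ne_nil t)
    · simp only [List.drop_succ_cons, List.drop_zero] at ih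
      rw [pvScan]
      simp only [h1, h2, Bool.false_eq_true, if_false, if_true, List.drop_succ_cons, List.drop_zero]
      rw [ih _ _ hq]
      simp
  | case4 c rest cur h1 h2 ih =>
    intro p ps ht
    rw [Ttok_other c rest h1 h2] at ht
    rcases hq : Ttok rest with _ | ⟨q, qs⟩
    · exact absurd hq (Ttok_ne_nil rest)
    · rw [hq] at ht
      simp only [consHead] at ht
      injection ht with ht1 ht2
      subst ht1; subst ht2
      rw [pvScan]
      simp only [h1, h2, if_false]
      rw [ih _ _ hq]
      simp

theorem splitCl_of_not_infix (s0 : Char) (sep l : List Char) (h : ¬ (s0 :: sep) <:+: l) :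
    splitCl s0 sep l = [l] := by
  induction l with
  | nil => rw [splitCl]
  | cons c rest ih =>
    have hnp : ¬ (s0 :: sep).isPrefixOf (c :: rest) := by
      rw [List.isPrefixOf_iff_prefix]
      exact fun hp => h hp.isInfix
    rw [splitCl_cons_of_not_prefix _ _ _ _ hnp,
        ih (fun hi => h (List.infix_cons hi)), consHead]
    simp

def aInnerF : List String → List Char → List String :=
  fun al v =>
    let tmp := PySem.Chars.replace v [' '] []
    if tmp.length ≠ 0 then al ++ [String.ofList tmp] else al

theorem aInnerF_eq (al : List String) (v : List Char) : aInnerF al v = al ++ pvFlush v := by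
  unfold aInnerF pvFlush
  rw [replace_single]
  rcases hv : v.filter (fun c => c ≠ ' ') with _ | ⟨d, ds⟩
  · simp [hv]
  · simp [hv]

def gA (a : List Char) : List String :=
  if PySem.Chars.isIn ['a', 'n', 'd'] a then
    (PySem.Chars.splitOn a [' ', 'a', 'n', 'd', ' ']).foldl aInnerF []
  else
    if (PySem.Chars.replace a [' '] []).length ≠ 0 then
      [String.ofList (PySem.Chars.replace a [' '] [])]
    else []

theorem gA_eq (a : List Char) : gA a = (splitCl ' ' ['a', 'n', 'd', ' '] a).flatMap pvFlush := by
  unfold gA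
  by_cases hin : PySem.Chars.isIn ['a', 'n', 'd'] a = true
  · simp only [hin, if_true]
    rw [splitOn_eq]
    have hfold : ∀ (xs : List (List Char)) init, List.foldl aInnerF init xs = init ++ xs.flatMap pvFlush := by
      intro xs
      induction xs with
      | nil => intro init; simp
      | cons x xs ih => intro init; rw [List.foldl_cons, aInnerF_eq, ih]; simp
    rw [hfold]
    simp
  · simp only [hin, if_false]
    have hni : ¬ [' ', 'a', 'n', 'd', ' '] <:+: a := by
      intro hi
      exact hin (PySem.Chars.isIn_iff_infix _ _ |>.mpr
        (List.IsInfix.trans (by decide) hi))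
    rw [splitCl_of_not_infix _ _ _ hni]
    have := aInnerF_eq [] a
    unfold aInnerF at this
    simp only [List.nil_append] at this
    simp only [List.flatMap_cons, List.flatMap_nil, List.append_nil]
    exact this

theorem outer_eq :
    ∀ (xs : List (List Char)) (st : Int) (init : List String),
      (PySem.List.enumerate xs st).foldl
        (fun casts ia =>
          let a := ia.2
          if PySem.Chars.isIn ['a', 'n', 'd'] a then
            let al := (PySem.Chars.splitOn a [' ', 'a', 'n', 'd', ' ']).foldl
              (fun al v =>
                let tmp := PySem.Chars.replace v [' '] []
                if tmp.length ≠ 0 then al ++ [String.ofList tmp] else al) []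
            casts ++ al
          else
            if (PySem.Chars.replace a [' '] []).length ≠ 0 then
              casts ++ [String.ofList (PySem.Chars.replace a [' '] [])]
            else casts) init
      = init ++ xs.flatMap gA := by
  intro xs
  induction xs with
  | nil => intro st init; simp [PySem.List.enumerate_nil]
  | cons x xs ih =>
    intro st init
    rw [PySem.List.enumerate_cons, List.foldl_cons, ih]
    have hx : (if PySem.Chars.isIn ['a', 'n', 'd'] x = true then
        init ++ (PySem.Chars.splitOn x [' ', 'a', 'n', 'd', ' ']).foldl aInnerF []
      else
        if (PySem.Chars.replace x [' '] []).length ≠ 0 then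
          init ++ [String.ofList (PySem.Chars.replace x [' '] [])]
        else init) = init ++ gA x := by
      unfold gA
      split_ifs <;> simp
    show (if PySem.Chars.isIn ['a', 'n', 'd'] x = true then
        init ++ (PySem.Chars.splitOn x [' ', 'a', 'n', 'd', ' ']).foldl aInnerF []
      else
        if (PySem.Chars.replace x [' '] []).length ≠ 0 then
          init ++ [String.ofList (PySem.Chars.replace x [' '] [])]
        else init) ++ xs.flatMap gA = init ++ (x :: xs).flatMap gA
    rw [hx]
    simp [List.flatMap_cons]

theorem parse_casts_eq (cast_str : String) : parse_casts cast_str = parse_casts_alt cast_str := by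
  have hA : parse_casts cast_str
      = [] ++ (PySem.Chars.splitOn
          (PySem.Chars.replace (PySem.Chars.lower cast_str.toList) ['\n'] []) [',', ' ']).flatMap gA :=
    outer_eq _ 0 []
  have hB : parse_casts_alt cast_str
      = pvScan (PySem.Chars.replace (PySem.Chars.lower cast_str.toList) ['\n'] []) [] := by
    show pvScan (PySem.Str.replace (PySem.Str.lower cast_str) "\n" "").toList [] = _
    rw [PySem.Str.toList_replace, PySem.Str.toList_lower,
      show ("\n" : String).toList = ['\n'] from rfl, show ("" : String).toList = [] from rfl]
  rw [hA, hB, splitOn_eq, funext gA_eq, ← List.flatMap_assoc, List.nil_append]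
  rcases ht : Ttok (PySem.Chars.replace (PySem.Chars.lower cast_str.toList) ['\n'] [])
    with _ | ⟨p, ps⟩
  · exact absurd ht (Ttok_ne_nil _)
  · have hA2 := ht
    unfold Ttok at hA2
    rw [hA2, pvScan_eq _ [] p ps ht]
    simp

-- ===== VERDICT (by name: the statement is the Claim_ definition above) =====
theorem parse_casts_spec : Claim_equal_parse_casts := by
  intro cast_str _
  unfold Spec_parse_casts
  exact parse_casts_eq cast_str
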